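-- pv_equiv track=rewrite | github.com/mvasanth/100Days | src/day4.py | getRawGrids
-- ===== SOURCE A (Python) =====
-- def getRawGrids(lines):
--     rawGrids = []
--     rawGrid = []
--
--     for line in lines:
--         if line == '':
--             # end of one grid
--             rawGrids.append(rawGrid)
--             # reset
--             rawGrid = []
--         else:
--             rawNums = line.split(" ")
--             nums = rawNums[:]
--             for num in rawNums:
--                 if num == '':
--                     nums.remove(num)
--                 else:
--                     rawGrid.append(int(num))
--
--     # append the last raw grid to the list
--     rawGrids.append(rawGrid)
--     return rawGrids
-- ===== SOURCE B (Python) =====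
-- def getRawGrids(lines):
--     # pass 1: group lines into blank-separated blocks of raw strings
--     blocks = [[]]
--     for line in lines:
--         if line == '':
--             blocks.append([])
--         else:
--             blocks[-1].append(line)
--     # pass 2: parse each block into its flat grid of ints
--     return [[int(tok) for line in block for tok in line.split(" ") if tok != '']
--             for block in blocks]
-- ===== Notes on version B (the rewrite author's own statement) =====
-- stated objective: simpler
-- what changed: B separates the work into two passes -- first group the lines into blank-separated blocks, then parse each block with one flat comprehension -- replacing A's single interleaved loop with its dead copy-and-remove token bookkeeping.
import Mathlib
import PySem

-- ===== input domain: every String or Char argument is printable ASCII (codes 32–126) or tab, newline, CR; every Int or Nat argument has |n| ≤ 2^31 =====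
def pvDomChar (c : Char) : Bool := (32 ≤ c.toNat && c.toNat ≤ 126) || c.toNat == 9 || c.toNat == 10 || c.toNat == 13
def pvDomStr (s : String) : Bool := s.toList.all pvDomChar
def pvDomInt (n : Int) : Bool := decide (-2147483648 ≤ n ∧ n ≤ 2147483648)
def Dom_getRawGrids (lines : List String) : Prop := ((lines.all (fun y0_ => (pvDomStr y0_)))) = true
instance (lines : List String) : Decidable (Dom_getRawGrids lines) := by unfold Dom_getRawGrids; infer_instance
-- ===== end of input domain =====

-- B splits A's single interleaved loop into two passes: group lines into blank-separated
-- blocks, then parse each block with one flat filtered map (objective: simpler).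

-- ===== PORT A =====
-- line.split(" "): sep is non-empty, so PySem.Str.split? is always some; .getD [] is exact.
def pvSplit (line : String) : List String := (PySem.Str.split? line " ").getD []

-- body of A's inner 'for num in rawNums' loop over the state (nums, rawGrid):
-- '' tokens are removed from nums (the unused copy), others appended as ints to rawGrid.
-- int(num) is PySem.Int.ofStr?; where Python raises ValueError (ofStr? = none) the input
-- is outside Pre_ and the port uses .getD 0.
def pvTokStep (st : List String × List Int) (num : String) : List String × List Int :=
  if num == "" then ((PySem.List.remove? st.1 num).getD st.1, st.2)
  else (st.1, st.2 ++ [(PySem.Int.ofStr? num).getD 0])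

-- A's loop over lines, carrying (rawGrids, rawGrid) exactly as Python does.
def pvGoA : List String → List (List Int) → List Int → List (List Int)
  | [], rawGrids, rawGrid => rawGrids ++ [rawGrid]
  | line :: rest, rawGrids, rawGrid =>
    if line == "" then
      pvGoA rest (rawGrids ++ [rawGrid]) []
    else
      let rawNums := pvSplit line
      let st := rawNums.foldl pvTokStep (rawNums, rawGrid)
      pvGoA rest rawGrids st.2

def getRawGrids (lines : List String) : List (List Int) :=
  pvGoA lines [] []

-- ===== PORT B =====
-- [int(tok) for tok in line.split(" ") if tok != '']
def pvLineInts (line : String) : List Int :=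
  ((pvSplit line).filter (fun t => !(t == ""))).map (fun t => (PySem.Int.ofStr? t).getD 0)

-- blocks[-1].append(line)
def pvAppendLast : List (List String) → String → List (List String)
  | [], line => [[line]]
  | [b], line => [b ++ [line]]
  | b :: rest, line => b :: pvAppendLast rest line

-- body of B's grouping loop
def pvBlockStep (bs : List (List String)) (line : String) : List (List String) :=
  if line == "" then bs ++ [[]] else pvAppendLast bs line

def getRawGrids_alt (lines : List String) : List (List Int) :=
  (lines.foldl pvBlockStep [[]]).map (fun block => block.flatMap pvLineInts)

-- ===== PRECONDITION & SPEC =====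
-- Pre_ excludes exactly the inputs on which Python's int() raises ValueError: some
-- non-empty token of some non-blank line fails to parse as an integer.
def Pre_getRawGrids (lines : List String) : Prop :=
  (lines.all (fun line =>
    line == "" ||
      (pvSplit line).all (fun t => t == "" || (PySem.Int.ofStr? t).isSome))) = true
instance (lines : List String) : Decidable (Pre_getRawGrids lines) := by
  unfold Pre_getRawGrids; infer_instance

def pvWitness_getRawGrids : List String := ["1 2", "", " 3  -4", "+5"]

def Spec_getRawGrids (lines : List String) (out : List (List Int)) : Prop := out = getRawGrids_alt lines
instance (lines : List String) (out : List (List Int)) : Decidable (Spec_getRawGrids lines out) := by unfold Spec_getRawGrids; infer_instance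

-- ===== CLAIM (what is proved, stated in full; the proofs are below) =====
def Claim_equal_getRawGrids : Prop := ∀ (lines : List String), Dom_getRawGrids lines → Pre_getRawGrids lines → Spec_getRawGrids lines (getRawGrids lines)

-- ===== LEMMAS AND PROOFS =====

-- B's grouping pass, as a structural recursion on the remaining lines with the current block.
def pvBlocksFrom : List String → List String → List (List String)
  | [], cur => [cur]
  | line :: rest, cur =>
    if line == "" then cur :: pvBlocksFrom rest []
    else pvBlocksFrom rest (cur ++ [line])

theorem pvAppendLast_snoc (bs : List (List String)) (c : List String) (l : String) :
    pvAppendLast (bs ++ [c]) l = bs ++ [c ++ [l]] := by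
  induction bs with
  | nil => rfl
  | cons b bs ih =>
    cases bs with
    | nil => simp [pvAppendLast]
    | cons b' bs' => simpa [pvAppendLast] using ih

theorem pvFoldl_blocks (ls : List String) (bs : List (List String)) (c : List String) :
    ls.foldl pvBlockStep (bs ++ [c]) = bs ++ pvBlocksFrom ls c := by
  induction ls generalizing bs c with
  | nil => rfl
  | cons l ls ih =>
    rw [List.foldl_cons]
    by_cases h : l = ""
    · have hs : pvBlockStep (bs ++ [c]) l = (bs ++ [c]) ++ [[]] := by
        simp [pvBlockStep, h]
      rw [hs, ih (bs ++ [c]) []]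
      simp [pvBlocksFrom, h]
    · have hs : pvBlockStep (bs ++ [c]) l = bs ++ [c ++ [l]] := by
        simp [pvBlockStep, h, pvAppendLast_snoc]
      rw [hs, ih bs (c ++ [l])]
      simp [pvBlocksFrom, h]

theorem pvInnerFold (toks : List String) (nums : List String) (g : List Int) :
    (toks.foldl pvTokStep (nums, g)).2
    = g ++ (toks.filter (fun t => !(t == ""))).map (fun t => (PySem.Int.ofStr? t).getD 0) := by
  induction toks generalizing nums g with
  | nil => simp
  | cons t ts ih =>
    rw [List.foldl_cons]
    by_cases h : t = ""
    · have hs : pvTokStep (nums, g) t = ((PySem.List.remove? nums t).getD nums, g) := by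
        simp [pvTokStep, h]
      rw [hs, ih]
      simp [h]
    · have hs : pvTokStep (nums, g) t = (nums, g ++ [(PySem.Int.ofStr? t).getD 0]) := by
        simp [pvTokStep, h]
      rw [hs, ih]
      simp [h]

theorem pvGoA_eq (ls : List String) (gs : List (List Int)) (c : List String) :
    pvGoA ls gs (c.flatMap pvLineInts)
      = gs ++ (pvBlocksFrom ls c).map (fun block => block.flatMap pvLineInts) := by
  induction ls generalizing gs c with
  | nil => simp [pvGoA, pvBlocksFrom]
  | cons l ls ih =>
    by_cases h : l = ""
    · have hA : pvGoA (l :: ls) gs (c.flatMap pvLineInts)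
          = pvGoA ls (gs ++ [c.flatMap pvLineInts]) [] := by
        simp [pvGoA, h]
      have h0 : ([] : List Int) = ([] : List String).flatMap pvLineInts := rfl
      rw [hA, h0, ih (gs ++ [c.flatMap pvLineInts]) []]
      simp [pvBlocksFrom, h]
    · have hA : pvGoA (l :: ls) gs (c.flatMap pvLineInts)
          = pvGoA ls gs (((pvSplit l).foldl pvTokStep (pvSplit l, c.flatMap pvLineInts)).2) := by
        simp [pvGoA, h]
      rw [hA, pvInnerFold]
      have hblk : c.flatMap pvLineInts ++ ((pvSplit l).filter (fun t => !(t == ""))).map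
            (fun t => (PySem.Int.ofStr? t).getD 0)
          = (c ++ [l]).flatMap pvLineInts := by
        simp [List.flatMap_append, pvLineInts]
      rw [hblk, ih gs (c ++ [l])]
      simp [pvBlocksFrom, h]

-- ===== VERDICT (by name: the statement is the Claim_ definition above) =====
theorem getRawGrids_spec : Claim_equal_getRawGrids := by
  intro lines _ _
  unfold Spec_getRawGrids getRawGrids getRawGrids_alt
  have h1 : pvGoA lines [] [] = pvGoA lines [] (([] : List String).flatMap pvLineInts) := rfl
  have h2 : lines.foldl pvBlockStep [[]] = pvBlocksFrom lines [] := by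
    have := pvFoldl_blocks lines [] []
    simpa using this
  rw [h1, pvGoA_eq, h2]
  simp
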